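-- pv_equiv track=rewrite | github.com/Choxmi/ProbabilityGame | AIMA/knowledge.py | consistent_det
-- ===== SOURCE A (Python) =====
-- def consistent_det(A, E):
--     """Check if the attributes(A) is consistent with the examples(E)"""
--     H = {}
--
--     for e in E:
--         attr_values = tuple(e[attr] for attr in A)
--         if attr_values in H and H[attr_values] != e['GOAL']:
--             return False
--         H[attr_values] = e['GOAL']
--
--     return True
-- ===== SOURCE B (Python) =====
-- def consistent_det(A, E):
--     """Check if the attributes(A) is consistent with the examples(E)"""
--     keys = {tuple(e[attr] for attr in A) for e in E}
--     pairs = {(tuple(e[attr] for attr in A), e['GOAL']) for e in E}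
--     return len(keys) == len(pairs)
-- ===== Notes on version B (the rewrite author's own statement) =====
-- stated objective: simpler
-- what changed: Replaces the stateful conflict-detecting dict scan with early return by two set comprehensions and a cardinality comparison: consistent iff |{key}| == |{(key, goal)}|.
import Mathlib
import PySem

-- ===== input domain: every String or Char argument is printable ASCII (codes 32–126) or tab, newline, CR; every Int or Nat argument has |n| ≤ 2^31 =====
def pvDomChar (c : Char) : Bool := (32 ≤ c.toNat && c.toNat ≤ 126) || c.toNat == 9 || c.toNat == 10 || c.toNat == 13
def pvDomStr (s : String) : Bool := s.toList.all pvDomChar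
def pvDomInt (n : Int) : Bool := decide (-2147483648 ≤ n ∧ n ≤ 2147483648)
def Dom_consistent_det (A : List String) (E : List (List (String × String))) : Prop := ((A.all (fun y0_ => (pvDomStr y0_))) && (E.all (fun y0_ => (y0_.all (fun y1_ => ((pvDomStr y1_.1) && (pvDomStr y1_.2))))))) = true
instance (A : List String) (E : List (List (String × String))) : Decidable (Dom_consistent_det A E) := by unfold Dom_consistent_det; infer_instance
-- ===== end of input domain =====

-- B replaces A's stateful dict scan with early return by two set comprehensions and a
-- cardinality comparison; objective: simpler.

-- ===== PORT A =====
-- e[k] on a dict-as-association-list: first match; "" only where Python raises KeyError,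
-- which Pre_consistent_det excludes.
def cdGet (e : List (String × String)) (k : String) : String :=
  ((e.find? (fun p => p.1 == k)).map Prod.snd).getD ""

-- tuple(e[attr] for attr in A)
def cdKey (A : List String) (e : List (String × String)) : List String :=
  A.map (cdGet e)

-- the 'for e in E' loop of A, carrying the dict H, with early return False on a conflict
def cdLoop (A : List String) (H : PySem.Dict (List String) String) :
    List (List (String × String)) → Bool
  | [] => true
  | e :: rest =>
    let key := cdKey A e
    let goal := cdGet e "GOAL"
    match PySem.Dict.get? H key with
    | some g => if g ≠ goal then false else cdLoop A (PySem.Dict.insert H key goal) rest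
    | none => cdLoop A (PySem.Dict.insert H key goal) rest

def consistent_det (A : List String) (E : List (List (String × String))) : Bool :=
  cdLoop A PySem.Dict.empty E

-- ===== PORT B =====
def consistent_det_alt (A : List String) (E : List (List (String × String))) : Bool :=
  let keys : PySem.Set (List String) := PySem.Set.ofList (E.map (fun e => cdKey A e))
  let pairs : PySem.Set (List String × String) :=
    PySem.Set.ofList (E.map (fun e => (cdKey A e, cdGet e "GOAL")))
  keys.length == pairs.length

-- ===== PRECONDITION & SPEC =====
-- Pre_ excludes inputs where some example lacks an attribute of A or the 'GOAL' key, on which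
-- A raises KeyError (except that A may return False early, before reaching the malformed
-- example, on which B then raises — such early-False inputs are excluded too).
def Pre_consistent_det (A : List String) (E : List (List (String × String))) : Prop :=
  ∀ e ∈ E, (∀ a ∈ A, ∃ p ∈ e, p.1 = a) ∧ (∃ p ∈ e, p.1 = "GOAL")
instance (A : List String) (E : List (List (String × String))) : Decidable (Pre_consistent_det A E) := by unfold Pre_consistent_det; infer_instance

def pvWitness_consistent_det : List String × (List (List (String × String))) :=
  (["x"], [[("x", "1"), ("GOAL", "y")], [("x", "2"), ("GOAL", "z")]])

def Spec_consistent_det (A : List String) (E : List (List (String × String))) (out : Bool) : Prop := out = consistent_det_alt A E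
instance (A : List String) (E : List (List (String × String))) (out : Bool) : Decidable (Spec_consistent_det A E out) := by unfold Spec_consistent_det; infer_instance

-- ===== CLAIM (what is proved, stated in full; the proofs are below) =====
def Claim_equal_consistent_det : Prop := ∀ (A : List String) (E : List (List (String × String))), Dom_consistent_det A E → Pre_consistent_det A E → Spec_consistent_det A E (consistent_det A E)

-- ===== LEMMAS AND PROOFS =====

-- "the key→goal assignment read off E is functional"
def FuncP {α β : Type} (P : List (α × β)) : Prop :=
  ∀ p ∈ P, ∀ q ∈ P, p.1 = q.1 → p.2 = q.2

-- characterisation of A's loop: true iff the remaining examples are functional and none of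
-- them contradicts the dict accumulated so far
theorem cdLoop_true_iff (A : List String) :
    ∀ (E : List (List (String × String))) (H : PySem.Dict (List String) String),
      cdLoop A H E = true ↔
        (FuncP (E.map (fun e => (cdKey A e, cdGet e "GOAL"))) ∧
         ∀ e ∈ E, ∀ v, H.get? (cdKey A e) = some v → v = cdGet e "GOAL") := by
  intro E
  induction E with
  | nil => intro H; simp [cdLoop, FuncP]
  | cons e rest ih =>
    intro H
    have step : cdLoop A H (e :: rest) = true ↔
        ((∀ v, H.get? (cdKey A e) = some v → v = cdGet e "GOAL") ∧
         cdLoop A (H.insert (cdKey A e) (cdGet e "GOAL")) rest = true) := by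
      simp only [cdLoop]
      cases hg : PySem.Dict.get? H (cdKey A e) with
      | none => simp
      | some g =>
        by_cases hne : g = cdGet e "GOAL" <;> simp [hne]
    -- goals from the inserted dict: e' of rest with the same key has the same goal
    have hins : ∀ e', (PySem.Dict.insert H (cdKey A e) (cdGet e "GOAL")).get? (cdKey A e') =
        if cdKey A e' = cdKey A e then some (cdGet e "GOAL") else H.get? (cdKey A e') := by
      intro e'; rw [PySem.Dict.get?_insert]
    rw [step, ih]
    constructor
    · rintro ⟨hH, hf, hrest⟩
      have hsame : ∀ e' ∈ rest, cdKey A e' = cdKey A e → cdGet e "GOAL" = cdGet e' "GOAL" := by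
        intro e' he' hk
        refine hrest e' he' (cdGet e "GOAL") ?_
        rw [hins e', if_pos hk]
      refine ⟨?_, ?_⟩
      · -- FuncP of the whole list
        intro p hp q hq hpq
        simp only [List.map_cons, List.mem_cons, List.mem_map] at hp hq
        rcases hp with rfl | ⟨e1, he1, rfl⟩ <;> rcases hq with rfl | ⟨e2, he2, rfl⟩
        · rfl
        · exact hsame e2 he2 (by simpa using hpq.symm)
        · exact (hsame e1 he1 (by simpa using hpq)).symm
        · exact hf _ (List.mem_map.mpr ⟨e1, he1, rfl⟩) _ (List.mem_map.mpr ⟨e2, he2, rfl⟩) hpq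
      · -- H condition for every example of e :: rest
        intro e' he' v hv
        rcases List.mem_cons.mp he' with rfl | he'
        · exact hH v hv
        · by_cases hk : cdKey A e' = cdKey A e
          · rw [hk] at hv
            exact (hH v hv).trans (hsame e' he' hk)
          · refine hrest e' he' v ?_
            rw [hins e', if_neg hk]; exact hv
    · rintro ⟨hf, hH⟩
      have hmem : ∀ e' ∈ rest, (cdKey A e', cdGet e' "GOAL") ∈
          (e :: rest).map (fun x => (cdKey A x, cdGet x "GOAL")) := by
        intro e' he'
        exact List.mem_map.mpr ⟨e', List.mem_cons_of_mem _ he', rfl⟩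
      have hhead : (cdKey A e, cdGet e "GOAL") ∈
          (e :: rest).map (fun x => (cdKey A x, cdGet x "GOAL")) := by
        exact List.mem_map.mpr ⟨e, List.mem_cons_self, rfl⟩
      refine ⟨fun v hv => hH e List.mem_cons_self v hv, ?_, ?_⟩
      · intro p hp q hq hpq
        rcases List.mem_map.mp hp with ⟨e1, he1, rfl⟩
        rcases List.mem_map.mp hq with ⟨e2, he2, rfl⟩
        exact hf _ (hmem e1 he1) _ (hmem e2 he2) hpq
      · intro e' he' v hv
        rw [hins e'] at hv
        by_cases hk : cdKey A e' = cdKey A e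
        · rw [if_pos hk] at hv
          have hv' : v = cdGet e "GOAL" := (Option.some.injEq _ _ ▸ hv).symm
          exact hv'.trans (hf _ hhead _ (hmem e' he') hk.symm)
        · rw [if_neg hk] at hv
          exact hH e' (List.mem_cons_of_mem _ he') v hv

-- a Python set's size is the Finset cardinality of the underlying list's elements
theorem pvLenOfList {γ : Type} [BEq γ] [LawfulBEq γ] [DecidableEq γ] (l : List γ) :
    (PySem.Set.ofList l).length = l.toFinset.card := by
  have hnd : (PySem.Set.ofList l).Nodup := PySem.Set.nodup_ofList l
  have hfs : (PySem.Set.ofList l).toFinset = l.toFinset := by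
    ext x; simp [List.mem_toFinset, PySem.Set.mem_ofList]
  rw [← List.toFinset_card_of_nodup hnd, hfs]

-- characterisation of B's cardinality test
theorem card_eq_iff_funcP {α β : Type} [BEq α] [LawfulBEq α] [DecidableEq α]
    [BEq (α × β)] [LawfulBEq (α × β)] [DecidableEq β] (P : List (α × β)) :
    ((PySem.Set.ofList (P.map Prod.fst)).length = (PySem.Set.ofList P).length ↔ FuncP P) := by
  have hmapfs : (P.map Prod.fst).toFinset = P.toFinset.image Prod.fst := by ext x; simp
  rw [pvLenOfList, pvLenOfList, hmapfs, Finset.card_image_iff]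
  constructor
  · intro hinj p hp q hq hpq
    have : p = q := hinj (List.mem_toFinset.mpr hp) (List.mem_toFinset.mpr hq) hpq
    rw [this]
  · intro hf x hx y hy hxy
    have := hf x (List.mem_toFinset.mp hx) y (List.mem_toFinset.mp hy) hxy
    exact Prod.ext hxy this

-- ===== VERDICT (by name: the statement is the Claim_ definition above) =====
theorem consistent_det_spec : Claim_equal_consistent_det := by
  intro A E _ _
  unfold Spec_consistent_det consistent_det consistent_det_alt
  rw [Bool.eq_iff_iff, cdLoop_true_iff, beq_iff_eq]
  have hmap : E.map (fun e => cdKey A e) =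
      (E.map (fun e => (cdKey A e, cdGet e "GOAL"))).map Prod.fst := by
    simp [List.map_map]
  rw [hmap, card_eq_iff_funcP]
  constructor
  · rintro ⟨hf, _⟩; exact hf
  · intro hf
    exact ⟨hf, fun e he v hv => by rw [PySem.Dict.get?_empty] at hv; cases hv⟩
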